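-- pv_equiv track=rewrite | github.com/undramatized/dbs_statement_tracker | src/extract_data.py | remove_page_info
-- ===== SOURCE A (Python) =====
-- def remove_page_info(content):
--     filtered = []
--     pending_delete = 0
--     for index, line in enumerate(content):
--         if pending_delete == 1:
--             pending_delete = 0
--         elif line[:4] == 'Page':
--             pending_delete = 1
--         else:
--             filtered.append(line)
--     return filtered
-- ===== SOURCE B (Python) =====
-- def remove_page_info(content):
--     out = []
--     rest = content
--     while True:
--         j = next((k for k, line in enumerate(rest) if line[:4] == 'Page'), None)
--         if j is None:
--             return out + rest
--         out += rest[:j]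
--         rest = rest[j + 2:]
-- ===== Notes on version B (the rewrite author's own statement) =====
-- stated objective: alternative
-- what changed: Replaces A's per-line pending_delete state machine with a search-and-slice loop: find the index of the next 'Page' header, copy the whole clean segment before it as one slice, then drop the header and its follower and repeat.
import Mathlib
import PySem

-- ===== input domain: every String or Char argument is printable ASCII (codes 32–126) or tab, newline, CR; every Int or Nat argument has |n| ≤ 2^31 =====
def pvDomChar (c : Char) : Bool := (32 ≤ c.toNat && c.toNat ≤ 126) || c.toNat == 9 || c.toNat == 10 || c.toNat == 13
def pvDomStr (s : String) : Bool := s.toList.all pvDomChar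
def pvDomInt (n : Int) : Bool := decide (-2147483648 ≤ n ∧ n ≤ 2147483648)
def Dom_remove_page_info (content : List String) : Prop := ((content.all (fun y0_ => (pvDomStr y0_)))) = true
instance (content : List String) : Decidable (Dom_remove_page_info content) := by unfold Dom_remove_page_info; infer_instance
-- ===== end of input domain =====

-- B replaces A's per-line pending_delete state machine with a search-and-slice loop
-- (find the next 'Page' header, copy the clean segment before it in one slice, drop two); same O(n) cost.
-- shared transliteration of the test "line[:4] == 'Page'" used by both Pythons
def pvIsPage (line : String) : Bool := PySem.Str.slice line none (some 4) == "Page"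

-- ===== PORT A =====
def pvStepA (st : List String × Int) (line : String) : List String × Int :=
  if st.2 == 1 then (st.1, 0)
  else if pvIsPage line then (st.1, 1)
  else (st.1 ++ [line], st.2)

def remove_page_info (content : List String) : List String :=
  (content.foldl pvStepA ([], 0)).1

-- ===== PORT B =====
def pvAltLoop (out rest : List String) : List String :=
  match h : rest.findIdx? pvIsPage with
  | none => out ++ rest
  | some j => pvAltLoop (out ++ rest.take j) (rest.drop (j + 2))
termination_by rest.length
decreasing_by
  have hj : j < rest.length := (List.findIdx?_eq_some_iff_getElem.mp h).1
  simp [List.length_drop]; omega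

def remove_page_info_alt (content : List String) : List String :=
  pvAltLoop [] content

-- ===== PRECONDITION & SPEC =====
def Spec_remove_page_info (content : List String) (out : List String) : Prop := out = remove_page_info_alt content
instance (content : List String) (out : List String) : Decidable (Spec_remove_page_info content out) := by unfold Spec_remove_page_info; infer_instance

-- ===== CLAIM (what is proved, stated in full; the proofs are below) =====
def Claim_equal_remove_page_info : Prop := ∀ (content : List String), Dom_remove_page_info content → Spec_remove_page_info content (remove_page_info content)

-- ===== LEMMAS AND PROOFS =====
-- reference shape used only by the proofs: the filtered output as a function of the remaining lines
def pvF : List String → List String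
  | [] => []
  | x :: rest =>
    if pvIsPage x then
      match rest with
      | [] => []
      | _ :: r => pvF r
    else x :: pvF rest

theorem pvF_pos_drop (x : String) (r : List String) (hx : pvIsPage x = true) :
    pvF (x :: r) = pvF (r.drop 1) := by
  cases r with
  | nil => rw [pvF.eq_def]; simp [hx, pvF]
  | cons y t => rw [pvF.eq_def]; simp [hx]

theorem pvF_neg (x : String) (r : List String) (hx : ¬ pvIsPage x = true) :
    pvF (x :: r) = x :: pvF r := by rw [pvF.eq_def]; simp [hx]

theorem pvF_append_clean (l₁ l₂ : List String) (h : ∀ x ∈ l₁, pvIsPage x = false) :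
    pvF (l₁ ++ l₂) = l₁ ++ pvF l₂ := by
  induction l₁ with
  | nil => simp
  | cons x t ih =>
      have hx : pvIsPage x = false := h x (by simp)
      rw [List.cons_append, pvF_neg x _ (by simp [hx]), ih (fun y hy => h y (by simp [hy]))]
      simp

theorem pvFoldA_zero (l : List String) :
    ∀ acc, (l.foldl pvStepA (acc, 0)).1 = acc ++ pvF l := by
  induction l using pvF.induct with
  | case1 => intro acc; simp [pvF]
  | case2 x hx =>
      intro acc
      rw [List.foldl_cons, pvF_pos_drop x [] hx]
      simp [pvStepA, hx, pvF]
  | case3 x hx y r ih =>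
      intro acc
      rw [List.foldl_cons, List.foldl_cons, pvF_pos_drop x (y :: r) hx]
      simp only [pvStepA, hx]
      simpa using ih acc
  | case4 x r hx ih =>
      intro acc
      rw [List.foldl_cons, pvF_neg x r hx]
      simp only [pvStepA, if_neg hx]
      simpa using ih (acc ++ [x])

theorem pvAltLoop_eq (out rest : List String) : pvAltLoop out rest = out ++ pvF rest := by
  induction out, rest using pvAltLoop.induct with
  | case1 out rest h =>
      rw [pvAltLoop]
      split
      · have hall : ∀ x ∈ rest, pvIsPage x = false := List.findIdx?_eq_none_iff.mp h
        have hF : pvF rest = rest := by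
          have := pvF_append_clean rest [] hall
          simpa [pvF] using this
        rw [hF]
      · next j h' => rw [h] at h'; cases h'
  | case2 out rest j h ih =>
      rw [pvAltLoop]
      split
      · next h' => rw [h] at h'; cases h'
      · next j' h' =>
          rw [h] at h'
          injection h' with hj'
          subst hj'
          rw [ih]
          obtain ⟨hj, hpj, hbefore⟩ := List.findIdx?_eq_some_iff_getElem.mp h
          have hclean : ∀ x ∈ rest.take j, pvIsPage x = false := by
            intro x hx
            obtain ⟨i, hi, hlt, rfl⟩ := List.mem_take_iff_getElem.mp hx
            exact Bool.eq_false_iff.mpr (by simpa using hbefore i (by omega))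
          have hsplit : rest = rest.take j ++ rest[j] :: rest.drop (j + 1) := by
            conv_lhs => rw [← List.take_append_drop j rest]
            rw [List.drop_eq_getElem_cons hj]
          have hF : pvF rest = rest.take j ++ pvF (rest.drop (j + 2)) := by
            conv_lhs => rw [hsplit]
            rw [pvF_append_clean _ _ hclean, pvF_pos_drop _ _ hpj, List.drop_drop]
          rw [hF, List.append_assoc]

-- ===== VERDICT (by name: the statement is the Claim_ definition above) =====
theorem remove_page_info_spec : Claim_equal_remove_page_info := by
  intro content _
  unfold Spec_remove_page_info remove_page_info remove_page_info_alt
  rw [pvFoldA_zero content [], pvAltLoop_eq [] content]
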